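-- pv_equiv track=rewrite | github.com/wangyz1999/pku_pos_modifier | stanford/stanford_pos.py | cpt_to_pku
-- ===== SOURCE A (Python) =====
-- def cpt_to_pku(cpt):
--     dic = {
--         'VA': 'a',
--         'VC': 'v',
--         'VE': 'v',
--         'VV': 'v',
--         'NR': 'ns',
--         'NT': 't',
--         'NN': 'n',
--         'LC': 'f',
--         'PN': 'r',
--         'DT': 'r',
--         'CD': 'm',
--         'OD': 'm',
--         'M': 'q',
--         'AD': 'd',
--         'P': 'p',
--         'CC': 'c',
--         'CS': 'c',
--         'DEC': 'u',
--         'DEG': 'u',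
--         'DER': 'u',
--         'DEV': 'u',
--         'SP': 'y',
--         'AS': 'u',
--         'ETC': 'u',
--         'MSP': 'u',
--         'IJ': 'e',
--         'ON': 'o',
--         'PU': 'w',
--         'JJ': 'b',
--         'FW': 'nx',
--         'LB': 'P',
--         'SB': 'P',
--         'BA': 'P',
--         'URL': 'nx',
--         'X':'nx',
--     }
--     pku = list()
--     for idx in range(len(cpt)):
--         if idx != len(cpt)-1 and cpt[idx][1] == 'VA' and cpt[idx+1][1] in ['VC','VE','VV']:
--             p = 'ad'
--         else:
--             p = dic[cpt[idx][1]]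
--         pku += [(cpt[idx][0],p)]
--     return pku
-- ===== SOURCE B (Python) =====
-- def cpt_to_pku(cpt):
--     dic = {
--         'VA': 'a', 'VC': 'v', 'VE': 'v', 'VV': 'v', 'NR': 'ns', 'NT': 't',
--         'NN': 'n', 'LC': 'f', 'PN': 'r', 'DT': 'r', 'CD': 'm', 'OD': 'm',
--         'M': 'q', 'AD': 'd', 'P': 'p', 'CC': 'c', 'CS': 'c', 'DEC': 'u',
--         'DEG': 'u', 'DER': 'u', 'DEV': 'u', 'SP': 'y', 'AS': 'u', 'ETC': 'u',
--         'MSP': 'u', 'IJ': 'e', 'ON': 'o', 'PU': 'w', 'JJ': 'b', 'FW': 'nx',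
--         'LB': 'P', 'SB': 'P', 'BA': 'P', 'URL': 'nx', 'X': 'nx',
--     }
--     verbs = {'VC', 'VE', 'VV'}
--     # single right-to-left pass: carry the tag of the item to the right (nxt),
--     # so no index arithmetic and no lookahead is needed.
--     rev = []
--     nxt = None
--     for word, tag in reversed(cpt):
--         if tag == 'VA' and nxt in verbs:
--             rev.append((word, 'ad'))
--         else:
--             rev.append((word, dic[tag]))
--         nxt = tag
--     rev.reverse()
--     return rev
-- ===== Notes on version B (the rewrite author's own statement) =====
-- stated objective: alternative
-- what changed: Replaces A's index loop with len-1 lookahead tests by a single right-to-left traversal that carries the previously seen tag as state and builds the result reversed, so no indexing or lookahead occurs.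
import Mathlib
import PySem

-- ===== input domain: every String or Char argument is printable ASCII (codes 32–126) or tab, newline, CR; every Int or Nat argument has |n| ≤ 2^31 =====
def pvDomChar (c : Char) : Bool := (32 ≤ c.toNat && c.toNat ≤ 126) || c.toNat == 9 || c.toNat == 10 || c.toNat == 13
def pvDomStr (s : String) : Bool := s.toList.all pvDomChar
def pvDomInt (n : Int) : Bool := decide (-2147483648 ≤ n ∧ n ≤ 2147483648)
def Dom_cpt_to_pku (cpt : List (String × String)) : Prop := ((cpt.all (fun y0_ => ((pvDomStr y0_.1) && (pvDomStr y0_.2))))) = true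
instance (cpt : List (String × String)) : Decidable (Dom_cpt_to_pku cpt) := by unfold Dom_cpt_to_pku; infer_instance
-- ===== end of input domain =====

-- B replaces A's index loop with lookahead tests by one right-to-left traversal carrying
-- the previously seen tag as state; same cost, no indexing.

-- The Stanford→PKU tag dictionary (shared constant of both programs).
def pkuDic : PySem.Dict String String := PySem.Dict.ofList
  [("VA", "a"), ("VC", "v"), ("VE", "v"), ("VV", "v"), ("NR", "ns"), ("NT", "t"),
   ("NN", "n"), ("LC", "f"), ("PN", "r"), ("DT", "r"), ("CD", "m"), ("OD", "m"),
   ("M", "q"), ("AD", "d"), ("P", "p"), ("CC", "c"), ("CS", "c"), ("DEC", "u"),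
   ("DEG", "u"), ("DER", "u"), ("DEV", "u"), ("SP", "y"), ("AS", "u"), ("ETC", "u"),
   ("MSP", "u"), ("IJ", "e"), ("ON", "o"), ("PU", "w"), ("JJ", "b"), ("FW", "nx"),
   ("LB", "P"), ("SB", "P"), ("BA", "P"), ("URL", "nx"), ("X", "nx")]

-- ===== PORT A =====
-- dic[t] is ported as (pkuDic.get? t).getD ""; the default is never reached under Pre_
-- (the KeyError inputs are excluded there).
def cpt_to_pku (cpt : List (String × String)) : List (String × String) :=
  (PySem.List.pyRange 0 (cpt.length : Int) 1).foldl
    (fun pku idx =>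
      pku ++ [((PySem.List.pyGetD cpt idx ("", "")).1,
        if idx ≠ (cpt.length : Int) - 1 ∧
            (PySem.List.pyGetD cpt idx ("", "")).2 = "VA" ∧
            (PySem.List.pyGetD cpt (idx + 1) ("", "")).2 ∈ (["VC", "VE", "VV"] : List String)
        then "ad"
        else (pkuDic.get? (PySem.List.pyGetD cpt idx ("", "")).2).getD "")])
    []

-- ===== PORT B =====
-- verbs = {'VC','VE','VV'} (a Python set)
def pkuVerbs : PySem.Set String := PySem.Set.ofList ["VC", "VE", "VV"]

-- 'nxt in verbs' where nxt is None or a tag string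
def nxtInVerbs : Option String → Bool
  | some t => PySem.Set.contains pkuVerbs t
  | none => false

def cpt_to_pku_alt (cpt : List (String × String)) : List (String × String) :=
  -- for word, tag in reversed(cpt): append, carrying nxt; finally reverse
  (cpt.reverse.foldl
    (fun (s : List (String × String) × Option String) wt =>
      ((if wt.2 = "VA" ∧ nxtInVerbs s.2 = true
        then s.1 ++ [(wt.1, "ad")]
        else s.1 ++ [(wt.1, (pkuDic.get? wt.2).getD "")]),
       some wt.2))
    ([], none)).1.reverse

-- ===== PRECONDITION & SPEC =====
-- Pre_ excludes exactly the inputs on which Python A raises KeyError: a pair whose tag is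
-- not a key of the dictionary.
def Pre_cpt_to_pku (cpt : List (String × String)) : Prop :=
  ∀ wt ∈ cpt, wt.2 ∈ (["VA", "VC", "VE", "VV", "NR", "NT", "NN", "LC", "PN", "DT", "CD",
    "OD", "M", "AD", "P", "CC", "CS", "DEC", "DEG", "DER", "DEV", "SP", "AS", "ETC",
    "MSP", "IJ", "ON", "PU", "JJ", "FW", "LB", "SB", "BA", "URL", "X"] : List String)
instance (cpt : List (String × String)) : Decidable (Pre_cpt_to_pku cpt) := by
  unfold Pre_cpt_to_pku; infer_instance

def pvWitness_cpt_to_pku : (List (String × String)) := [("he", "PN"), ("tall", "VA"), ("is", "VC")]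

def Spec_cpt_to_pku (cpt : List (String × String)) (out : List (String × String)) : Prop := out = cpt_to_pku_alt cpt
instance (cpt : List (String × String)) (out : List (String × String)) : Decidable (Spec_cpt_to_pku cpt out) := by unfold Spec_cpt_to_pku; infer_instance

-- ===== CLAIM (what is proved, stated in full; the proofs are below) =====
def Claim_equal_cpt_to_pku : Prop := ∀ (cpt : List (String × String)), Dom_cpt_to_pku cpt → Pre_cpt_to_pku cpt → Spec_cpt_to_pku cpt (cpt_to_pku cpt)

-- ===== LEMMAS AND PROOFS =====

-- The element A emits at position j (Nat form of A's loop body).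
def aelem (cpt : List (String × String)) (j : Nat) : String × String :=
  ((cpt.getD j ("", "")).1,
   if (j : Int) ≠ (cpt.length : Int) - 1 ∧ (cpt.getD j ("", "")).2 = "VA" ∧
      (cpt.getD (j + 1) ("", "")).2 ∈ (["VC", "VE", "VV"] : List String)
   then "ad" else (pkuDic.get? (cpt.getD j ("", "")).2).getD "")

-- Head-recursive characterisation shared by both proofs.
def bspec : List (String × String) → List (String × String)
  | [] => []
  | wt :: rest =>
    (if wt.2 = "VA" ∧ nxtInVerbs (rest.head?.map Prod.snd) = true
     then (wt.1, "ad") else (wt.1, (pkuDic.get? wt.2).getD "")) :: bspec rest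

theorem a_eq_map (cpt : List (String × String)) :
    cpt_to_pku cpt = (List.range cpt.length).map (aelem cpt) := by
  unfold cpt_to_pku
  rw [PySem.List.foldl_append_singleton_eq_map, PySem.List.pyRange_zero_natCast,
    List.map_map]
  refine List.map_congr_left ?_
  intro j hj
  have h1 : ((j : Int) + 1) = ((j + 1 : Nat) : Int) := by push_cast; ring
  simp only [Function.comp, h1, PySem.List.pyGetD_natCast, aelem]

theorem alt_foldr (cpt : List (String × String)) :
    cpt.foldr
      (fun wt (s : List (String × String) × Option String) =>
        ((if wt.2 = "VA" ∧ nxtInVerbs s.2 = true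
          then s.1 ++ [(wt.1, "ad")]
          else s.1 ++ [(wt.1, (pkuDic.get? wt.2).getD "")]),
         some wt.2))
      ([], none)
    = ((bspec cpt).reverse, cpt.head?.map Prod.snd) := by
  induction cpt with
  | nil => rfl
  | cons wt rest ih =>
    simp only [List.foldr_cons, ih, bspec, List.head?_cons, Option.map_some,
      List.reverse_cons]
    split_ifs <;> rfl

theorem alt_eq_bspec (cpt : List (String × String)) :
    cpt_to_pku_alt cpt = bspec cpt := by
  unfold cpt_to_pku_alt
  rw [List.foldl_reverse, alt_foldr]
  simp

theorem aelem_cons_succ (wt : String × String) (rest : List (String × String)) (j : Nat) :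
    aelem (wt :: rest) (j + 1) = aelem rest j := by
  unfold aelem
  have hc : ((j + 1 : Nat) : Int) ≠ ((wt :: rest).length : Int) - 1 ↔
      (j : Int) ≠ (rest.length : Int) - 1 := by
    simp only [List.length_cons]; omega
  simp only [List.getD_cons_succ, hc]

theorem aelem_cons_zero (wt : String × String) (rest : List (String × String)) :
    aelem (wt :: rest) 0 =
      (if wt.2 = "VA" ∧ nxtInVerbs (rest.head?.map Prod.snd) = true
       then (wt.1, "ad") else (wt.1, (pkuDic.get? wt.2).getD "")) := by
  cases rest with
  | nil => simp [aelem, nxtInVerbs]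
  | cons r t =>
    have hne : ((0 : Nat) : Int) ≠ ((wt :: r :: t).length : Int) - 1 := by
      simp only [List.length_cons]; push_cast; omega
    simp only [aelem, List.getD_cons_zero, List.getD_cons_succ, hne, ne_eq,
      not_false_eq_true, true_and, List.head?_cons, Option.map_some, nxtInVerbs]
    have hmem : PySem.Set.contains pkuVerbs r.2 = true ↔
        r.2 ∈ (["VC", "VE", "VV"] : List String) := by
      simp [pkuVerbs, PySem.Set.mem_ofList]
    by_cases h : wt.2 = "VA" ∧ r.2 ∈ (["VC", "VE", "VV"] : List String)
    · rw [if_pos h, if_pos ⟨h.1, hmem.mpr h.2⟩]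
    · rw [if_neg h, if_neg (by rw [hmem]; exact h)]

theorem bspec_eq_map (cpt : List (String × String)) :
    bspec cpt = (List.range cpt.length).map (aelem cpt) := by
  induction cpt with
  | nil => rfl
  | cons wt rest ih =>
    rw [bspec, ih, List.length_cons, List.range_succ_eq_map, List.map_cons,
      List.map_map, aelem_cons_zero]
    congr 1
    refine List.map_congr_left ?_
    intro j _
    exact (aelem_cons_succ wt rest j).symm

-- ===== VERDICT (by name: the statement is the Claim_ definition above) =====
theorem cpt_to_pku_spec : Claim_equal_cpt_to_pku := by
  intro cpt _ _
  unfold Spec_cpt_to_pku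
  rw [a_eq_map, alt_eq_bspec, bspec_eq_map]
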